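-- pv_equiv track=rewrite | github.com/bradyc59/CA314 | mp/score_hand.py | isNPairs
-- ===== SOURCE A (Python) =====
-- def isNPairs(hand, n):
--     cardValueCount = dict()
--     for card in hand:
--         suit, value = card
--         cardValueCount[value] = cardValueCount.get(value, 0) + 1
--     count = 0
--     for cardValue in cardValueCount:
--         if cardValueCount[cardValue] == 2:
--             count += 1
--     return count == n
-- ===== SOURCE B (Python) =====
-- def isNPairs(hand, n):
--     # Sort the card values, then scan consecutive equal runs, counting runs of length exactly 2.
--     values = sorted(v for _, v in hand)
--     count = 0
--     i = 0
--     m = len(values)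
--     while i < m:
--         j = i + 1
--         while j < m and values[j] == values[i]:
--             j += 1
--         if j - i == 2:
--             count += 1
--         i = j
--     return count == n
-- ===== Notes on version B (the rewrite author's own statement) =====
-- stated objective: alternative
-- what changed: Replaced A's dict frequency table plus key-iteration pass with sorting the card values and scanning consecutive equal runs, counting runs of length exactly 2.
import Mathlib
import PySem

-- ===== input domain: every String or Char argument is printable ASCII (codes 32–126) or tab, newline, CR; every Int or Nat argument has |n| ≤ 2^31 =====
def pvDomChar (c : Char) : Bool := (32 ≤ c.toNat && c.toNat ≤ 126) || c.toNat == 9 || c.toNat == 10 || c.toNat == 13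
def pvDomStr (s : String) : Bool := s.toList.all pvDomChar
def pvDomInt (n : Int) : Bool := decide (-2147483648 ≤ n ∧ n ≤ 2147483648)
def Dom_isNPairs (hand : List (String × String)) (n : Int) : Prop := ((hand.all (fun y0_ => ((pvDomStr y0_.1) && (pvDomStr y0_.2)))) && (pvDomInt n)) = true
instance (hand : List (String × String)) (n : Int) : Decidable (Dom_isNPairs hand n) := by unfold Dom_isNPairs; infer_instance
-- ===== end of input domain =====

-- B replaces A's hash-map frequency table with a sort-then-scan over consecutive equal runs (objective: alternative; return value only, neither program mutates its arguments).


-- ===== PORT A =====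
def isNPairs (hand : List (String × String)) (n : Int) : Bool :=
  let cardValueCount : PySem.Dict String Int :=
    hand.foldl (fun d card => d.insert card.2 (d.getD card.2 0 + 1)) PySem.Dict.empty
  -- 'cardValueCount[cardValue]' is exact as getD here: the loop iterates the dict's own keys
  let count : Int :=
    cardValueCount.keys.foldl
      (fun count cardValue => if cardValueCount.getD cardValue 0 == 2 then count + 1 else count) 0
  decide (count = n)

-- ===== PORT B =====
-- outer while loop of Source B: scan one maximal run of equal values (the inner while loop = takeWhile/dropWhile),
-- bump count exactly when the run has length 2 (j - i == 2)
def pyRunScan : List String → Int → Int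
  | [], count => count
  | v :: rest, count =>
      pyRunScan (rest.dropWhile (fun x => x == v))
        (if (rest.takeWhile (fun x => x == v)).length + 1 == 2 then count + 1 else count)
termination_by ys _ => ys.length
decreasing_by
  have := (List.dropWhile_sublist (l := rest) (fun x => x == v)).length_le
  simp; omega

def isNPairs_alt (hand : List (String × String)) (n : Int) : Bool :=
  let values := PySem.List.sorted (hand.map (fun c => c.2)) (fun v => v) false
  decide (pyRunScan values 0 = n)

-- ===== PRECONDITION & SPEC =====
def Spec_isNPairs (hand : List (String × String)) (n : Int) (out : Bool) : Prop := out = isNPairs_alt hand n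
instance (hand : List (String × String)) (n : Int) (out : Bool) : Decidable (Spec_isNPairs hand n out) := by unfold Spec_isNPairs; infer_instance

-- ===== CLAIM (what is proved, stated in full; the proofs are below) =====
def Claim_equal_isNPairs : Prop := ∀ (hand : List (String × String)) (n : Int), Dom_isNPairs hand n → Spec_isNPairs hand n (isNPairs hand n)

-- ===== LEMMAS AND PROOFS =====

-- countP agrees on two duplicate-free lists with the same members
lemma countP_eq_of_nodup_of_mem_iff {l₁ l₂ : List String} (p : String → Bool)
    (h₁ : l₁.Nodup) (h₂ : l₂.Nodup) (hm : ∀ x, x ∈ l₁ ↔ x ∈ l₂) :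
    l₁.countP p = l₂.countP p :=
  ((List.perm_ext_iff_of_nodup h₁ h₂).mpr hm).countP_eq p

-- on a sorted list, B's run scan counts the distinct values of multiplicity exactly 2
lemma pyRunScan_sorted (ys : List String) (c : Int) :
    List.Pairwise (· ≤ ·) ys →
    pyRunScan ys c = c + ((PySem.Set.ofList ys).countP (fun v => ys.count v == 2) : Nat) := by
  fun_induction pyRunScan ys c with
  | case1 c => intro _; simp [PySem.Set.ofList]
  | case2 v rest c ih =>
    intro hs
    rw [List.pairwise_cons] at hs
    obtain ⟨hv, hrest⟩ := hs
    set t := rest.takeWhile (fun x => x == v) with ht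
    set d := rest.dropWhile (fun x => x == v) with hd
    have hsplit : t ++ d = rest := List.takeWhile_append_dropWhile
    have h1 : ∀ x ∈ t, x = v := by
      intro x hx
      exact eq_of_beq (List.mem_takeWhile_imp (p := fun x => x == v) hx)
    have hdsub : d.Sublist rest := List.dropWhile_sublist _
    have hpd : List.Pairwise (· ≤ ·) d := hrest.sublist hdsub
    have h2 : v ∉ d := by
      intro hmem
      cases hdc : d with
      | nil => rw [hdc] at hmem; simp at hmem
      | cons w tl =>
        have hdc' : List.dropWhile (fun x => x == v) rest = w :: tl := by rw [← hd]; exact hdc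
        have hw : (w == v) = false := by
          have hne : List.dropWhile (fun x => x == v) rest ≠ [] := by rw [hdc']; simp
          have := List.head_dropWhile_not (fun x => x == v) hne
          simp only [hdc', List.head_cons] at this
          exact this
        rw [hdc] at hmem
        rcases List.mem_cons.mp hmem with h | h
        · rw [← h] at hw; simp at hw
        · -- v ∈ tl: pairwise on d gives w ≤ v, and v ≤ w from hv; so w = v, contradicting hw
          have hwv : w ≤ v := by
            rw [hdc] at hpd
            exact (List.pairwise_cons.mp hpd).1 v h
          have hvw : v ≤ w := hv w (hdsub.mem (by rw [hdc]; simp))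
          have : w = v := le_antisymm hwv hvw
          rw [this] at hw; simp at hw
    have hcv : List.count v (v :: rest) = t.length + 1 := by
      rw [List.count_cons_self, ← hsplit, List.count_append]
      have hct : List.count v t = t.length := List.count_eq_length.mpr (fun b hb => (h1 b hb).symm)
      have hcd : List.count v d = 0 := List.count_eq_zero.mpr h2
      omega
    have hcw : ∀ w, w ≠ v → List.count w (v :: rest) = List.count w d := by
      intro w hwv
      rw [List.count_cons, ← hsplit, List.count_append]
      have hct : List.count w t = 0 := List.count_eq_zero.mpr (fun hmem => hwv (h1 w hmem))
      have hvw : (v == w) = false := by simp; exact fun h => hwv h.symm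
      simp [hvw, hct]
    have hnodup2 : (v :: PySem.Set.ofList d).Nodup := by
      refine List.nodup_cons.mpr ⟨?_, PySem.Set.nodup_ofList d⟩
      rw [PySem.Set.mem_ofList]; exact h2
    have hmemiff : ∀ x, x ∈ PySem.Set.ofList (v :: rest) ↔ x ∈ (v :: PySem.Set.ofList d) := by
      intro x
      simp only [PySem.Set.mem_ofList, List.mem_cons, ← hsplit, List.mem_append]
      constructor
      · rintro (h | h | h)
        · exact Or.inl h
        · exact Or.inl (h1 x h)
        · exact Or.inr h
      · rintro (h | h)
        · exact Or.inl h
        · exact Or.inr (Or.inr h)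
    have hstep : List.countP (fun w => List.count w (v :: rest) == 2) (PySem.Set.ofList (v :: rest))
        = (if (t.length + 1 == 2) = true then 1 else 0) + List.countP (fun w => List.count w d == 2) (PySem.Set.ofList d) := by
      rw [countP_eq_of_nodup_of_mem_iff _ (PySem.Set.nodup_ofList _) hnodup2 hmemiff]
      rw [List.countP_cons]
      have hcong : List.countP (fun w => List.count w (v :: rest) == 2) (PySem.Set.ofList d)
          = List.countP (fun w => List.count w d == 2) (PySem.Set.ofList d) := by
        apply List.countP_congr
        intro x hx
        have hxd : x ∈ d := (PySem.Set.mem_ofList d x).mp hx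
        have hxv : x ≠ v := fun h => h2 (h ▸ hxd)
        rw [hcw x hxv]
      rw [hcong, hcv]
      omega
    have ih' := ih hpd
    simp only [dite_eq_ite] at ih'
    rw [ih', hstep]
    split <;> push_cast <;> ring

theorem isNPairs_eq (hand : List (String × String)) (n : Int) :
    isNPairs hand n = isNPairs_alt hand n := by
  unfold isNPairs isNPairs_alt
  simp only []
  set vals := hand.map (fun c => c.2) with hvals
  set ys := PySem.List.sorted vals (fun v => v) false with hys
  have hperm : ys.Perm vals := PySem.List.sorted_perm vals (fun v => v) false
  -- A's dict loop is the Counter of the values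
  have hA : hand.foldl (fun d card => d.insert card.2 (d.getD card.2 0 + 1)) PySem.Dict.empty
      = PySem.Dict.counter vals := by
    rw [hvals]
    calc hand.foldl (fun d card => d.insert card.2 (d.getD card.2 0 + 1)) PySem.Dict.empty
        = (hand.map (fun c => c.2)).foldl (fun (d : PySem.Dict String Int) x => d.insert x (d.getD x 0 + 1)) PySem.Dict.empty :=
          (List.foldl_map (f := fun c : String × String => c.2) (g := fun (d : PySem.Dict String Int) x => d.insert x (d.getD x 0 + 1)) (l := hand) (init := PySem.Dict.empty)).symm
      _ = _ := PySem.Dict.foldl_insert_getD_add_one_eq_counter _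
  rw [hA, PySem.List.foldl_if_add_one]
  -- B's scan counts the same thing
  have hB : pyRunScan ys 0 = 0 + ((PySem.Set.ofList ys).countP (fun v => ys.count v == 2) : Nat) := by
    apply pyRunScan_sorted
    exact PySem.List.sorted_pairwise vals (fun v => v)
  rw [hB]
  -- the two countP's agree
  have hcnt : List.countP (fun k => (PySem.Dict.counter vals).getD k 0 == 2) (PySem.Dict.counter vals).keys
      = List.countP (fun v => ys.count v == 2) (PySem.Set.ofList ys) := by
    rw [PySem.Dict.keys_counter]
    have e1 : List.countP (fun k => (PySem.Dict.counter vals).getD k 0 == 2) (PySem.Set.ofList vals)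
        = List.countP (fun k => vals.count k == 2) (PySem.Set.ofList vals) := by
      apply List.countP_congr
      intro x _
      rw [PySem.Dict.getD_counter]
      constructor <;> intro h <;> simp_all <;> omega
    have e2 : List.countP (fun v => ys.count v == 2) (PySem.Set.ofList ys)
        = List.countP (fun v => vals.count v == 2) (PySem.Set.ofList ys) := by
      apply List.countP_congr
      intro x _
      rw [hperm.count_eq]
    have e3 : List.countP (fun v => vals.count v == 2) (PySem.Set.ofList ys)
        = List.countP (fun v => vals.count v == 2) (PySem.Set.ofList vals) := by
      apply countP_eq_of_nodup_of_mem_iff _ (PySem.Set.nodup_ofList _) (PySem.Set.nodup_ofList _)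
      intro x
      rw [PySem.Set.mem_ofList, PySem.Set.mem_ofList]
      exact hperm.mem_iff
    rw [e1, e2, e3]
  rw [hcnt]

-- ===== VERDICT (by name: the statement is the Claim_ definition above) =====
theorem isNPairs_spec : Claim_equal_isNPairs := by
  intro hand n _
  exact isNPairs_eq hand n
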